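-- pv_equiv track=rewrite | github.com/erickhouse/practice | python/AmazonQuiz.py | lengthEachScene
-- ===== SOURCE A (Python) =====
-- def lengthEachScene(inputList):
--
--     pairs = dict()
--
--     # calculate the range for every character
--     for i in range(0, len(inputList)):
--         c = inputList[i]
--         if inputList[i] not in pairs:
--             pairs[c] = [i,i]
--         else:
--             pairs[c][1] = i # update the upper bound of the range if you have found a better one
--
--     vals = pairs.values()
--     ranges = list()
--
--     # merge all of the calculated ranges into groups where the overlap
--     for r in vals:
--         if not ranges:
--             ranges.append(r)
--         else:
--             last = ranges[-1]
--
--             # determine if they overlap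
--             if r[0] <= last[1] and r[1] >= last[0]:
--                 if last[1] < r[1]:
--                     last[1] = r[1] # update if the overlap extends the range (makes it bigger)
--             else:
--                 ranges.append(r)
--
--     # figure out the distances between the lowest and highest
--     return list(map(lambda x: len(range(x[0], x[1])) + 1, ranges))
-- ===== SOURCE B (Python) =====
-- def lengthEachScene(inputList):
--     # single last-occurrence sweep instead of a first/last range table plus a range-merge pass
--     last = {}
--     for i, c in enumerate(inputList):
--         last[c] = i
--     result = []
--     start = 0
--     end = 0
--     for i, c in enumerate(inputList):
--         end = max(end, last[c])
--         if i == end: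
--             result.append(i - start + 1)
--             start = i + 1
--     return result
-- ===== Notes on version B (the rewrite author's own statement) =====
-- stated objective: idiomatic
-- what changed: B replaces A's per-character first/last range table plus a separate range-merge pass over the dict values by the standard single sweep over the sequence that maintains a running chunk end as the max of last-occurrence indices and cuts a chunk whenever the index reaches it.
import Mathlib
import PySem

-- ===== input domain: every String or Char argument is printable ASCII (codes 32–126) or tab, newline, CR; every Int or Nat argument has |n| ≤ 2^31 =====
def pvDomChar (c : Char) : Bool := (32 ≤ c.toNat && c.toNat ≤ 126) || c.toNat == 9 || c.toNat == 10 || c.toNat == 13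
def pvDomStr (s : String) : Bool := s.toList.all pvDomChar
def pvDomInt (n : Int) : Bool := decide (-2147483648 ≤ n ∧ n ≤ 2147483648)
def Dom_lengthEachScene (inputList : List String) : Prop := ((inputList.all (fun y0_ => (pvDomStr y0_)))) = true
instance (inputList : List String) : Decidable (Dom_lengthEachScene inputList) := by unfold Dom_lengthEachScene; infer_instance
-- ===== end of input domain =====

-- B replaces A's first/last-range table plus range-merge pass by a single running-last-occurrence sweep (objective: simpler/idiomatic, same value).

-- ===== PORT A =====
-- literal transliteration of A: range table per character (dict, first-occurrence order),
-- then a merge pass over its values, then lengths via len(range(lo, hi)) + 1.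
-- 'pairs[c][1] = i' is PySem.Dict.modify (only reached when c is a key, so the dflt (0,0) is never used).
def lengthEachScene (inputList : List String) : List Int :=
  let pairs : PySem.Dict String (Int × Int) :=
    (PySem.List.pyRange 0 (inputList.length : Int) 1).foldl
      (fun pairs i =>
        let c := PySem.List.pyGetD inputList i ""
        if pairs.contains c = false then pairs.insert c (i, i)
        else pairs.modify c (0, 0) (fun p => (p.1, i)))
      PySem.Dict.empty
  let vals := pairs.values
  let ranges : List (Int × Int) :=
    vals.foldl
      (fun ranges r =>
        if ranges.isEmpty then ranges ++ [r]
        else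
          let last := (PySem.List.pyGet? ranges (-1)).getD (0, 0)
          if r.1 ≤ last.2 ∧ r.2 ≥ last.1 then
            (if last.2 < r.2 then ranges.dropLast ++ [(last.1, r.2)] else ranges)
          else ranges ++ [r])
      []
  ranges.map (fun x => ((PySem.List.pyRange x.1 x.2 1).length : Int) + 1)

-- ===== PORT B =====
-- literal transliteration of B (Source B): build last-occurrence dict, then one sweep with (result, start, end).
def lengthEachScene_alt (inputList : List String) : List Int :=
  let last : PySem.Dict String Int :=
    (PySem.List.enumerate inputList 0).foldl (fun d ic => d.insert ic.2 ic.1) PySem.Dict.empty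
  let fin :=
    (PySem.List.enumerate inputList 0).foldl
      (fun (s : List Int × Int × Int) ic =>
        let e := max s.2.2 (last.getD ic.2 0)
        if ic.1 = e then (s.1 ++ [ic.1 - s.2.1 + 1], ic.1 + 1, e)
        else (s.1, s.2.1, e))
      ([], 0, 0)
  fin.1

-- ===== PRECONDITION & SPEC =====
def Spec_lengthEachScene (inputList : List String) (out : List Int) : Prop := out = lengthEachScene_alt inputList
instance (inputList : List String) (out : List Int) : Decidable (Spec_lengthEachScene inputList out) := by unfold Spec_lengthEachScene; infer_instance

-- ===== CLAIM (what is proved, stated in full; the proofs are below) =====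
def Claim_equal_lengthEachScene : Prop := ∀ (inputList : List String), Dom_lengthEachScene inputList → Spec_lengthEachScene inputList (lengthEachScene inputList)

-- ===== LEMMAS AND PROOFS =====

-- first index of c in xs (xs.length if absent), as Int
def fIdx (xs : List String) (c : String) : Int := (xs.idxOf c : Int)
-- last index of c in xs, as Int (for c ∈ xs)
def lIdx (xs : List String) (c : String) : Int := (xs.length : Int) - 1 - (xs.reverse.idxOf c : Int)
-- running maximum of last indices over all characters whose first occurrence is ≤ i
def MV (xs : List String) (i : Int) : Int :=
  (((PySem.Set.ofList xs).filter (fun c => decide (fIdx xs c ≤ i))).map (fun c => lIdx xs c)).foldl max 0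
-- positions j < m with MV j = j ("cuts", i.e. chunk right ends), increasing
def cutsB (xs : List String) (m : Int) : List Int :=
  (PySem.List.pyRange 0 m 1).filter (fun i => decide (MV xs i = i))
-- successive differences against a running previous cut
def diffsF (p : Int) : List Int → List Int
  | [] => []
  | c :: t => (c - p) :: diffsF c t
-- chunk ranges (prev+1, cut) from the cut list
def chunksOf (p : Int) : List Int → List (Int × Int)
  | [] => []
  | c :: t => (p + 1, c) :: chunksOf c t

-- ---- generic max-fold helpers ----
lemma foldl_max_init (t : List Int) (a b : Int) : t.foldl max (max a b) = max a (t.foldl max b) := by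
  induction t generalizing b with
  | nil => rfl
  | cons x t ih => simpa [List.foldl, max_assoc] using ih (max b x)

lemma foldl_max_le {t : List Int} {a B : Int} (ha : a ≤ B) (h : ∀ y ∈ t, y ≤ B) : t.foldl max a ≤ B := by
  induction t generalizing a with
  | nil => simpa using ha
  | cons x t ih =>
      exact ih (by simp [ha, h x (by simp)]) (fun y hy => h y (by simp [hy]))

lemma foldl_max_eq_of_mem_iff {l₁ l₂ : List Int} (h : ∀ y, y ∈ l₁ ↔ y ∈ l₂) :
    l₁.foldl max 0 = l₂.foldl max 0 := by
  have half : ∀ (u v : List Int), (∀ y ∈ u, y ∈ v) → u.foldl max 0 ≤ v.foldl max 0 := by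
    intro u v huv
    rcases PySem.List.foldl_max_mem u 0 with h0 | hm
    · rw [h0]; exact (PySem.List.le_foldl_max v 0).1
    · exact (PySem.List.le_foldl_max v 0).2 _ (huv _ hm)
  exact le_antisymm (half _ _ fun y hy => (h y).1 hy) (half _ _ fun y hy => (h y).2 hy)

-- ---- idxOf facts ----
lemma idxOf_le_of_getElem {xs : List String} {k : ℕ} (hk : k < xs.length) : xs.idxOf xs[k] ≤ k := by
  induction xs generalizing k with
  | nil => simp at hk
  | cons a t ih =>
      cases k with
      | zero => simp
      | succ k =>
          have hk' : k < t.length := by simpa using hk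
          have hih := ih hk'
          simp only [List.getElem_cons_succ, List.idxOf_cons]
          cases h : (a == t[k]) <;> simp <;> omega

-- ---- fIdx / lIdx basic facts ----
lemma fIdx_nonneg (xs : List String) (c : String) : 0 ≤ fIdx xs c := by
  simp [fIdx]

lemma fIdx_lt_len {xs : List String} {c : String} (h : c ∈ xs) : fIdx xs c < (xs.length : Int) := by
  have := List.idxOf_lt_length_iff.2 h
  simpa [fIdx] using Int.ofNat_lt.2 this

lemma cover_f {xs : List String} {k : ℕ} (hk : k < xs.length) : fIdx xs xs[k] ≤ (k : Int) := by
  simpa [fIdx] using Int.ofNat_le.2 (idxOf_le_of_getElem hk)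

lemma cover_l {xs : List String} {k : ℕ} (hk : k < xs.length) : (k : Int) ≤ lIdx xs xs[k] := by
  have hrev : xs.reverse[xs.length - 1 - k]'(by simp; omega) = xs[k] := by
    rw [List.getElem_reverse]; congr 1; omega
  have := idxOf_le_of_getElem (xs := xs.reverse) (k := xs.length - 1 - k) (by simp; omega)
  rw [hrev] at this
  have : xs.reverse.idxOf xs[k] ≤ xs.length - 1 - k := this
  simp only [lIdx]
  omega

lemma lIdx_le {xs : List String} {c : String} (_h : c ∈ xs) : lIdx xs c ≤ (xs.length : Int) - 1 := by
  simp only [lIdx]; omega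

lemma fIdx_le_lIdx {xs : List String} {c : String} (h : c ∈ xs) : fIdx xs c ≤ lIdx xs c := by
  have h1 : xs.idxOf c < xs.length := List.idxOf_lt_length_iff.2 h
  have h2 : xs[xs.idxOf c] = c := List.getElem_idxOf h1
  have := cover_l (xs := xs) (k := xs.idxOf c) h1
  rw [h2] at this
  simpa [fIdx] using this

lemma getElem_of_fIdx {xs : List String} {c : String} (h : c ∈ xs) {k : ℕ} (hk : k < xs.length)
    (hf : fIdx xs c = (k : Int)) : xs[k] = c := by
  have h1 : xs.idxOf c < xs.length := List.idxOf_lt_length_iff.2 h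
  have hh : k = xs.idxOf c := by simp only [fIdx] at hf; omega
  subst hh
  exact List.getElem_idxOf h1

-- append steps
lemma fIdx_append_of_mem {xs : List String} {c : String} (h : c ∈ xs) (a : String) :
    fIdx (xs ++ [a]) c = fIdx xs c := by
  simp [fIdx, List.idxOf_append_of_mem h]

lemma fIdx_append_self {xs : List String} {a : String} (h : a ∉ xs) :
    fIdx (xs ++ [a]) a = (xs.length : Int) := by
  simp [fIdx, List.idxOf_append, h]

lemma lIdx_append_self (xs : List String) (a : String) :
    lIdx (xs ++ [a]) a = (xs.length : Int) := by
  simp [lIdx, List.reverse_append]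

lemma lIdx_append_of_ne {xs : List String} {c a : String} (h : c ≠ a) :
    lIdx (xs ++ [a]) c = lIdx xs c := by
  simp [lIdx, Ne.symm h]
  omega

-- sortedness of distinct chars by first index
lemma ofList_append_singleton (xs : List String) (a : String) :
    PySem.Set.ofList (xs ++ [a]) = PySem.Set.add (PySem.Set.ofList xs) a := by
  rw [PySem.Set.ofList_eq_foldl, PySem.Set.ofList_eq_foldl, List.foldl_append]
  rfl

lemma mem_set_iff (xs : List String) (c : String) :
    c ∈ (PySem.Set.ofList xs : List String) ↔ c ∈ xs := PySem.Set.mem_ofList xs c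

lemma set_add_of_mem {s : PySem.Set String} {a : String} (h : a ∈ s) : s.add a = s := by
  unfold PySem.Set.add PySem.Set.contains
  simp [h]

lemma set_add_of_not_mem {s : PySem.Set String} {a : String} (h : a ∉ s) : s.add a = s ++ [a] := by
  unfold PySem.Set.add PySem.Set.contains
  simp [h]

lemma sorted_fIdx (xs : List String) :
    (PySem.Set.ofList xs : List String).Pairwise (fun a b => fIdx xs a < fIdx xs b) := by
  induction xs using List.reverseRecOn with
  | nil => simp [PySem.Set.ofList_eq_foldl]
  | append_singleton xs a ih =>
      rw [ofList_append_singleton]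
      by_cases ha : a ∈ xs
      · rw [set_add_of_mem ((mem_set_iff xs a).2 ha)]
        refine ih.imp_of_mem ?_
        intro b c hb hc h
        rw [fIdx_append_of_mem ((mem_set_iff xs b).1 hb) a,
            fIdx_append_of_mem ((mem_set_iff xs c).1 hc) a]
        exact h
      · rw [set_add_of_not_mem (fun h => ha ((mem_set_iff xs a).1 h)), List.pairwise_append]
        refine ⟨ih.imp_of_mem ?_, by simp, ?_⟩
        · intro b c hb hc h
          rw [fIdx_append_of_mem ((mem_set_iff xs b).1 hb) a,
              fIdx_append_of_mem ((mem_set_iff xs c).1 hc) a]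
          exact h
        · intro b hb c hc
          simp only [List.mem_singleton] at hc
          rw [hc, fIdx_append_of_mem ((mem_set_iff xs b).1 hb) a, fIdx_append_self ha]
          exact fIdx_lt_len ((mem_set_iff xs b).1 hb)

-- ---- dict characterizations ----
lemma pairs_items (xs : List String) :
    ((PySem.List.enumerate xs 0).foldl
      (fun d (ic : Int × String) =>
        if d.contains ic.2 = false then d.insert ic.2 (ic.1, ic.1)
        else d.modify ic.2 (0, 0) (fun p => (p.1, ic.1)))
      PySem.Dict.empty).items
    = (PySem.Set.ofList xs : List String).map (fun c => (c, (fIdx xs c, lIdx xs c))) := by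
  induction xs using List.reverseRecOn with
  | nil => rfl
  | append_singleton xs a ih =>
      rw [PySem.List.enumerate_append, List.foldl_append]
      set D := (PySem.List.enumerate xs 0).foldl
        (fun d (ic : Int × String) =>
          if d.contains ic.2 = false then d.insert ic.2 (ic.1, ic.1)
          else d.modify ic.2 (0, 0) (fun p => (p.1, ic.1)))
        PySem.Dict.empty with hD
      have hkeys : D.keys = (PySem.Set.ofList xs : List String) := by
        show D.items.map Prod.fst = _
        rw [ih]
        simp [Function.comp_def]
      have hcont : D.contains a = (a ∈ xs : Bool) := by
        by_cases ha : a ∈ xs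
        · simp [ha, (PySem.Dict.contains_iff_mem_keys D a).2 (hkeys ▸ (mem_set_iff xs a).2 ha)]
        · simp only [ha, decide_false]
          by_contra hc
          have := (PySem.Dict.contains_iff_mem_keys D a).1 (by revert hc; cases D.contains a <;> simp)
          rw [hkeys, mem_set_iff] at this
          exact ha this
      rw [PySem.List.enumerate_cons, PySem.List.enumerate_nil]
      simp only [List.foldl_cons, List.foldl_nil]
      by_cases ha : a ∈ xs
      · -- modify branch
        have hc : D.contains a = true := by rw [hcont]; simp [ha]
        rw [if_neg (by simp [hc])]
        have hnd : D.keys.Nodup := by rw [hkeys]; exact PySem.Set.nodup_ofList xs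
        have hmem : (a, (fIdx xs a, lIdx xs a)) ∈ D.items := by
          rw [ih]
          exact List.mem_map.2 ⟨a, (mem_set_iff xs a).2 ha, rfl⟩
        have hget : D.getD a (0, 0) = (fIdx xs a, lIdx xs a) :=
          PySem.Dict.getD_of_mem_items D hmem hnd (0, 0)
        show (D.insert a _).items = _
        rw [PySem.Dict.items_insert_of_contains D _ hc, ih, hget]
        have hset : PySem.Set.ofList (xs ++ [a]) = PySem.Set.ofList xs := by
          rw [ofList_append_singleton, set_add_of_mem ((mem_set_iff xs a).2 ha)]
        rw [hset, List.map_map]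
        refine List.map_congr_left ?_
        intro c hc'
        have hcx : c ∈ xs := (mem_set_iff xs c).1 hc'
        by_cases hca : c = a
        · rw [hca]
          simp [fIdx_append_of_mem ha a, lIdx_append_self]
        · simp [Function.comp, hca, fIdx_append_of_mem hcx a, lIdx_append_of_ne hca]
      · -- insert branch
        have hc : D.contains a = false := by rw [hcont]; simp [ha]
        rw [if_pos (by simp [hc])]
        rw [PySem.Dict.items_insert_of_not_contains D _ hc, ih]
        have hset : PySem.Set.ofList (xs ++ [a]) = PySem.Set.ofList xs ++ [a] := by
          rw [ofList_append_singleton, set_add_of_not_mem (fun h => ha ((mem_set_iff xs a).1 h))]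
        rw [hset, List.map_append]
        congr 1
        · refine List.map_congr_left ?_
          intro c hc'
          have hcx : c ∈ xs := (mem_set_iff xs c).1 hc'
          have hca : c ≠ a := fun h => ha (h ▸ hcx)
          simp [fIdx_append_of_mem hcx a, lIdx_append_of_ne hca]
        · simp [fIdx_append_self ha, lIdx_append_self]

lemma last_getD (xs : List String) {c : String} (h : c ∈ xs) :
    ((PySem.List.enumerate xs 0).foldl (fun d (ic : Int × String) => d.insert ic.2 ic.1)
      PySem.Dict.empty).getD c 0 = lIdx xs c := by
  induction xs using List.reverseRecOn with
  | nil => simp at h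
  | append_singleton xs a ih =>
      rw [PySem.List.enumerate_append, List.foldl_append,
        PySem.List.enumerate_cons, PySem.List.enumerate_nil]
      simp only [List.foldl_cons, List.foldl_nil]
      rw [PySem.Dict.getD_insert]
      by_cases hca : c = a
      · subst hca
        simp [lIdx_append_self]
      · rw [if_neg hca]
        have hcx : c ∈ xs := by
          rcases List.mem_append.1 h with h' | h'
          · exact h'
          · simp at h'; exact absurd h' hca
        rw [ih hcx, lIdx_append_of_ne hca]

-- ---- MV facts ----
lemma le_MV {xs : List String} {c : String} (h : c ∈ xs) {i : Int} (hf : fIdx xs c ≤ i) :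
    lIdx xs c ≤ MV xs i := by
  apply (PySem.List.le_foldl_max _ 0).2
  simp only [List.mem_map, List.mem_filter, PySem.Set.mem_ofList]
  exact ⟨c, ⟨h, by simpa using hf⟩, rfl⟩

lemma MV_nonneg (xs : List String) (i : Int) : 0 ≤ MV xs i :=
  (PySem.List.le_foldl_max _ 0).1

lemma MV_le {xs : List String} (hne : xs ≠ []) (i : Int) : MV xs i ≤ (xs.length : Int) - 1 := by
  apply foldl_max_le
  · have : 0 < xs.length := List.length_pos_iff.2 hne
    omega
  · intro y hy
    simp only [List.mem_map, List.mem_filter, PySem.Set.mem_ofList] at hy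
    obtain ⟨c, ⟨hc, _⟩, rfl⟩ := hy
    exact lIdx_le hc

lemma MV_neg (xs : List String) {i : Int} (hi : i < 0) : MV xs i = 0 := by
  unfold MV
  have : ((PySem.Set.ofList xs : List String).filter (fun c => decide (fIdx xs c ≤ i))) = [] := by
    refine List.filter_eq_nil_iff.2 ?_
    intro c _
    have := fIdx_nonneg xs c
    simp only [decide_eq_true_eq]
    omega
  rw [this]
  rfl

lemma MV_plateau (xs : List String) {i j : Int} (hj : j ≤ i)
    (h : ∀ c ∈ xs, fIdx xs c ≤ i → fIdx xs c ≤ j) : MV xs i = MV xs j := by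
  apply foldl_max_eq_of_mem_iff
  intro y
  simp only [List.mem_map, List.mem_filter, PySem.Set.mem_ofList, decide_eq_true_eq]
  constructor
  · rintro ⟨c, ⟨hc, hf⟩, rfl⟩; exact ⟨c, ⟨hc, h c hc hf⟩, rfl⟩
  · rintro ⟨c, ⟨hc, hf⟩, rfl⟩; exact ⟨c, ⟨hc, le_trans hf hj⟩, rfl⟩

lemma MV_step (xs : List String) (k : ℕ) (hk : k < xs.length) :
    MV xs k = max (MV xs ((k : Int) - 1)) (lIdx xs xs[k]) := by
  have hmm : MV xs k
      = (lIdx xs xs[k] :: ((PySem.Set.ofList xs : List String).filter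
          (fun c => decide (fIdx xs c ≤ (k : Int) - 1))).map (fun c => lIdx xs c)).foldl max 0 := by
    apply foldl_max_eq_of_mem_iff
    intro y
    simp only [List.mem_cons, List.mem_map, List.mem_filter, PySem.Set.mem_ofList,
      decide_eq_true_eq]
    constructor
    · rintro ⟨c, ⟨hc, hf⟩, rfl⟩
      by_cases h1 : fIdx xs c ≤ (k : Int) - 1
      · exact Or.inr ⟨c, ⟨hc, h1⟩, rfl⟩
      · have hfk : fIdx xs c = (k : Int) := by omega
        have := getElem_of_fIdx hc hk hfk
        exact Or.inl (by rw [← this])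
    · rintro (rfl | ⟨c, ⟨hc, hf⟩, rfl⟩)
      · exact ⟨xs[k], ⟨List.getElem_mem hk, cover_f hk⟩, rfl⟩
      · exact ⟨c, ⟨hc, by omega⟩, rfl⟩
  rw [hmm, List.foldl_cons, max_comm 0 (lIdx xs xs[k]), foldl_max_init]
  rw [max_comm]
  rfl

-- ---- cuts facts ----
lemma cutsB_nonpos (xs : List String) {m : Int} (hm : m ≤ 0) : cutsB xs m = [] := by
  simp [cutsB, PySem.List.pyRange_one_eq_nil hm]

lemma cutsB_succ (xs : List String) {m : Int} (hm : 0 ≤ m) :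
    cutsB xs (m + 1) = cutsB xs m ++ (if MV xs m = m then [m] else []) := by
  simp only [cutsB, PySem.List.pyRange_one_succ_right hm, List.filter_append]
  congr 1
  by_cases h : MV xs m = m <;> simp [h]

lemma cutsB_mem {xs : List String} {m i : Int} (h : i ∈ cutsB xs m) : 0 ≤ i ∧ i < m ∧ MV xs i = i := by
  simp only [cutsB, List.mem_filter, PySem.List.mem_pyRange_one, decide_eq_true_eq] at h
  exact ⟨h.1.1, h.1.2, h.2⟩

lemma cutsB_pairwise (xs : List String) (m : Int) : (cutsB xs m).Pairwise (· < ·) :=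
  (PySem.List.pairwise_lt_pyRange_one 0 m).filter _

lemma cutsB_getLastD_lt {xs : List String} {m : Int} (hm : 0 ≤ m) :
    -1 ≤ (cutsB xs m).getLastD (-1) ∧ (cutsB xs m).getLastD (-1) < m := by
  rcases (cutsB xs m).eq_nil_or_concat with h | ⟨l, b, h⟩
  · rw [h]; simpa using hm
  · rw [List.concat_eq_append] at h
    rw [h, List.getLastD_concat]
    have hb : b ∈ cutsB xs m := by rw [h]; simp
    have := cutsB_mem hb
    omega

-- extend the cut list across a plateau: between m and m' the only cut is at e = MV m
lemma cutsB_extend (xs : List String) {m m' e : Int} (hm : 0 ≤ m) (hmm' : m ≤ m')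
    (he : MV xs m = e) (hme : m ≤ e) (hem' : e < m')
    (hplat : ∀ i, m ≤ i → i < m' → MV xs i = e) :
    cutsB xs m' = cutsB xs m ++ [e] := by
  unfold cutsB
  rw [PySem.List.pyRange_one_append 0 m m' hm (by omega), List.filter_append,
      PySem.List.pyRange_one_append m e m' hme (by omega),
      PySem.List.pyRange_one_cons hem', List.filter_append]
  have h1 : (PySem.List.pyRange m e 1).filter (fun i => decide (MV xs i = i)) = [] := by
    refine List.filter_eq_nil_iff.2 ?_
    intro i hi
    rw [PySem.List.mem_pyRange_one] at hi
    rw [hplat i hi.1 (by omega)]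
    simp only [decide_eq_true_eq]
    omega
  have h2 : MV xs e = e := hplat e (by omega) hem'
  have h3 : (PySem.List.pyRange (e + 1) m' 1).filter (fun i => decide (MV xs i = i)) = [] := by
    refine List.filter_eq_nil_iff.2 ?_
    intro i hi
    rw [PySem.List.mem_pyRange_one] at hi
    rw [hplat i (by omega) hi.2]
    simp only [decide_eq_true_eq]
    omega
  rw [h1, List.filter_cons, h3]
  simp [h2]

-- ---- diffs / chunks ----
lemma diffsF_append (p : Int) (l : List Int) (c : Int) :
    diffsF p (l ++ [c]) = diffsF p l ++ [c - l.getLastD p] := by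
  induction l generalizing p with
  | nil => simp [diffsF]
  | cons x t ih =>
      simp only [List.cons_append, diffsF, ih x, List.getLastD_cons]

lemma chunksOf_append (p : Int) (l : List Int) (c : Int) :
    chunksOf p (l ++ [c]) = chunksOf p l ++ [(l.getLastD p + 1, c)] := by
  induction l generalizing p with
  | nil => simp [chunksOf]
  | cons x t ih =>
      simp only [List.cons_append, chunksOf, ih x, List.getLastD_cons]

lemma map_len_chunksOf (p : Int) (l : List Int) (h : (p :: l).Pairwise (· < ·)) :
    (chunksOf p l).map (fun x => ((PySem.List.pyRange x.1 x.2 1).length : Int) + 1) = diffsF p l := by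
  induction l generalizing p with
  | nil => rfl
  | cons c t ih =>
      simp only [List.pairwise_cons] at h
      have hpc : p < c := h.1 c (by simp)
      have hrec := ih c (by
        rw [List.pairwise_cons]
        exact ⟨fun y hy => h.2.1 y hy, h.2.2⟩)
      simp only [PySem.List.length_pyRange_one] at hrec
      simp only [chunksOf, diffsF, List.map_cons, PySem.List.length_pyRange_one, hrec]
      congr 1
      have : ((c - (p + 1)).toNat : Int) = c - (p + 1) := Int.toNat_of_nonneg (by omega)
      omega


-- ---- bridging the ports to the abstract folds ----

-- the merge step of A's second loop
def mergeStep (ranges : List (Int × Int)) (r : Int × Int) : List (Int × Int) :=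
  if ranges.isEmpty then ranges ++ [r]
  else
    let last := (PySem.List.pyGet? ranges (-1)).getD (0, 0)
    if r.1 ≤ last.2 ∧ r.2 ≥ last.1 then
      (if last.2 < r.2 then ranges.dropLast ++ [(last.1, r.2)] else ranges)
    else ranges ++ [r]

-- the sweep step of B's loop (with B's last-occurrence dict inlined)
def stepB (xs : List String) (s : List Int × Int × Int) (ic : Int × String) : List Int × Int × Int :=
  let e := max s.2.2
    (((PySem.List.enumerate xs 0).foldl (fun d ic => d.insert ic.2 ic.1) PySem.Dict.empty).getD ic.2 0)
  if ic.1 = e then (s.1 ++ [ic.1 - s.2.1 + 1], ic.1 + 1, e)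
  else (s.1, s.2.1, e)

lemma B_eq (xs : List String) :
    lengthEachScene_alt xs = ((PySem.List.enumerate xs 0).foldl (stepB xs) ([], 0, 0)).1 := rfl

lemma pyGet_neg_one_concat (l : List (Int × Int)) (x : Int × Int) :
    (PySem.List.pyGet? (l ++ [x]) (-1)).getD (0, 0) = x := by
  simp [PySem.List.pyGet?, PySem.List.pyIdx?]

lemma A_eq (xs : List String) :
    lengthEachScene xs
      = (((PySem.Set.ofList xs : List String).foldl
            (fun rngs c => mergeStep rngs (fIdx xs c, lIdx xs c)) []).map
          (fun x => ((PySem.List.pyRange x.1 x.2 1).length : Int) + 1)) := by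
  unfold lengthEachScene
  have henum : PySem.List.enumerate xs 0
      = (PySem.List.pyRange 0 (xs.length : Int) 1).map
          (fun j => (j, PySem.List.pyGetD xs j "")) := by
    have := PySem.List.enumerate_eq_map_pyRange xs ""
    simpa using this
  have hpairs : (PySem.List.pyRange 0 ((xs.length : Int)) 1).foldl
      (fun pairs i =>
        let c := PySem.List.pyGetD xs i ""
        if pairs.contains c = false then pairs.insert c (i, i)
        else pairs.modify c (0, 0) (fun p => (p.1, i)))
      PySem.Dict.empty
      = (PySem.List.enumerate xs 0).foldl
        (fun d (ic : Int × String) =>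
          if d.contains ic.2 = false then d.insert ic.2 (ic.1, ic.1)
          else d.modify ic.2 (0, 0) (fun p => (p.1, ic.1)))
        PySem.Dict.empty := by
    rw [henum, List.foldl_map]
  rw [hpairs]
  dsimp only
  have hvals : ((PySem.List.enumerate xs 0).foldl
      (fun d (ic : Int × String) =>
        if d.contains ic.2 = false then d.insert ic.2 (ic.1, ic.1)
        else d.modify ic.2 (0, 0) (fun p => (p.1, ic.1)))
      PySem.Dict.empty).values
      = (PySem.Set.ofList xs : List String).map (fun c => (fIdx xs c, lIdx xs c)) := by
    show (_ : PySem.Dict String (Int × Int)).items.map Prod.snd = _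
    rw [pairs_items, List.map_map]
    rfl
  rw [hvals, List.foldl_map]
  rfl

-- ---- more cut-list facts ----
lemma cutsB_stable (xs : List String) {m m' : Int} (h0 : 0 ≤ m) (hmm' : m ≤ m')
    (h : ∀ i, m ≤ i → i < m' → MV xs i ≠ i) : cutsB xs m' = cutsB xs m := by
  unfold cutsB
  rw [PySem.List.pyRange_one_append 0 m m' h0 hmm', List.filter_append]
  have hnil : (PySem.List.pyRange m m' 1).filter (fun i => decide (MV xs i = i)) = [] := by
    refine List.filter_eq_nil_iff.2 ?_
    intro i hi
    rw [PySem.List.mem_pyRange_one] at hi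
    simpa using h i hi.1 hi.2
  rw [hnil, List.append_nil]

lemma split_facts (xs P S : List String) (c : String)
    (hsplit : (PySem.Set.ofList xs : List String) = P ++ c :: S) :
    (∀ p ∈ P, fIdx xs p < fIdx xs c) ∧ (∀ s ∈ S, fIdx xs c < fIdx xs s) ∧
    (∀ d ∈ xs, d ∈ P ∨ d = c ∨ d ∈ S) ∧ c ∈ xs := by
  have hp := sorted_fIdx xs
  rw [hsplit, List.pairwise_append, List.pairwise_cons] at hp
  obtain ⟨_, ⟨hS, _⟩, hcross⟩ := hp
  refine ⟨fun p hip => hcross p hip c (by simp), hS, ?_, ?_⟩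
  · intro d hd
    have : d ∈ P ++ c :: S := hsplit ▸ (mem_set_iff xs d).2 hd
    simpa using this
  · have : c ∈ P ++ c :: S := by simp
    rw [← hsplit, mem_set_iff] at this
    exact this

lemma MV_plateau_split (xs P S : List String) (c : String)
    (hsplit : (PySem.Set.ofList xs : List String) = P ++ c :: S)
    (bound : Int) (hb : ∀ s ∈ S, bound ≤ fIdx xs s) :
    ∀ i, fIdx xs c ≤ i → i < bound → MV xs i = MV xs (fIdx xs c) := by
  obtain ⟨h1, h2, h3, hc⟩ := split_facts xs P S c hsplit
  intro i hci hib
  refine MV_plateau xs hci ?_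
  intro d hd hdi
  rcases h3 d hd with hdP | rfl | hdS
  · exact le_of_lt (h1 d hdP)
  · exact le_refl _
  · exact absurd hdi (by have := hb d hdS; omega)

-- MV at the position of a first occurrence, in terms of the previous MV
lemma MV_at_first (xs : List String) {c : String} (hc : c ∈ xs) :
    MV xs (fIdx xs c) = max (MV xs (fIdx xs c - 1)) (lIdx xs c) := by
  have h1 : xs.idxOf c < xs.length := List.idxOf_lt_length_iff.2 hc
  have := MV_step xs (xs.idxOf c) h1
  rw [List.getElem_idxOf h1] at this
  simpa [fIdx] using this

-- ---- the A-side invariant ----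
lemma A_inv (xs : List String) (S : List String) : ∀ (P : List String) (c : String),
    (PySem.Set.ofList xs : List String) = P ++ c :: S →
    S.foldl (fun rngs c' => mergeStep rngs (fIdx xs c', lIdx xs c'))
      (chunksOf (-1) (cutsB xs (fIdx xs c))
        ++ [((cutsB xs (fIdx xs c)).getLastD (-1) + 1, MV xs (fIdx xs c))])
    = chunksOf (-1) (cutsB xs (xs.length : Int)) := by
  induction S with
  | nil =>
      intro P c hsplit
      obtain ⟨h1, h2, h3, hc⟩ := split_facts xs P [] c hsplit
      have hxne : xs ≠ [] := fun h => by subst h; simp at hc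
      set fc := fIdx xs c with hfc
      set e := MV xs fc with he
      have hfc0 : 0 ≤ fc := fIdx_nonneg xs c
      have hfcn : fc < (xs.length : Int) := fIdx_lt_len hc
      have hle : lIdx xs c ≤ e := le_MV hc (le_refl _)
      have hfce : fc ≤ e := le_trans (fIdx_le_lIdx hc) hle
      have hen : e ≤ (xs.length : Int) - 1 := MV_le hxne fc
      have hplat := MV_plateau_split xs P [] c hsplit (xs.length : Int) (by simp)
      have hcuts : cutsB xs (xs.length : Int) = cutsB xs fc ++ [e] := by
        refine cutsB_extend xs hfc0 (le_of_lt hfcn) rfl hfce (by omega) ?_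
        intro i hi1 hi2
        rw [hplat i hi1 hi2]
      rw [List.foldl_nil, hcuts, chunksOf_append]
  | cons c' S' ih =>
      intro P c hsplit
      obtain ⟨h1, h2, h3, hc⟩ := split_facts xs P (c' :: S') c hsplit
      have hsplit' : (PySem.Set.ofList xs : List String) = (P ++ [c]) ++ c' :: S' := by
        rw [hsplit]; simp
      obtain ⟨h1', h2', h3', hc'⟩ := split_facts xs (P ++ [c]) S' c' hsplit'
      have hxne : xs ≠ [] := fun h => by subst h; simp at hc
      set fc := fIdx xs c with hfc
      set e := MV xs fc with he
      set fc' := fIdx xs c' with hfc'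
      set lc' := lIdx xs c' with hlc'
      have hfc0 : 0 ≤ fc := fIdx_nonneg xs c
      have hfcn : fc < (xs.length : Int) := fIdx_lt_len hc
      have hle : lIdx xs c ≤ e := le_MV hc (le_refl _)
      have hfce : fc ≤ e := le_trans (fIdx_le_lIdx hc) hle
      have hen : e ≤ (xs.length : Int) - 1 := MV_le hxne fc
      have hfcc' : fc < fc' := h2 c' (by simp)
      have hfc'n : fc' < (xs.length : Int) := fIdx_lt_len hc'
      have hfc'lc' : fc' ≤ lc' := fIdx_le_lIdx hc'
      have hlast := cutsB_getLastD_lt (xs := xs) (m := fc) hfc0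
      have hbnd : ∀ s ∈ (c' :: S'), fc' ≤ fIdx xs s := by
        intro s hs
        rcases List.mem_cons.1 hs with rfl | hs'
        · exact le_refl _
        · exact le_of_lt (h2' _ hs')
      have hplat := MV_plateau_split xs P (c' :: S') c hsplit fc' hbnd
      have hMVprev : MV xs (fc' - 1) = e := hplat (fc' - 1) (by omega) (by omega)
      have hMVfc' : MV xs fc' = max e lc' := by
        rw [MV_at_first xs hc', ← hfc', hMVprev]
      rw [List.foldl_cons]
      have hne : ¬(chunksOf (-1) (cutsB xs fc)
          ++ [((cutsB xs fc).getLastD (-1) + 1, e)]).isEmpty = true := by simp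
      by_cases hcase : fc' ≤ e
      · -- c' overlaps the current chunk: merge
        have hcuts' : cutsB xs fc' = cutsB xs fc := by
          refine cutsB_stable xs hfc0 (le_of_lt hfcc') ?_
          intro i hi1 hi2
          rw [hplat i hi1 hi2]
          have hee : MV xs (fIdx xs c) = e := rfl
          omega
        have hstep : mergeStep
            (chunksOf (-1) (cutsB xs fc) ++ [((cutsB xs fc).getLastD (-1) + 1, e)])
            (fc', lc')
            = chunksOf (-1) (cutsB xs fc')
              ++ [((cutsB xs fc').getLastD (-1) + 1, MV xs fc')] := by
          unfold mergeStep
          rw [if_neg hne, pyGet_neg_one_concat]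
          rw [if_pos ⟨hcase, by omega⟩]
          by_cases hext : e < lc'
          · rw [if_pos hext, List.dropLast_concat, hcuts', hMVfc',
                max_eq_right (le_of_lt hext)]
          · rw [if_neg hext, hcuts', hMVfc', max_eq_left (not_lt.1 hext)]
        rw [hstep]
        exact ih (P ++ [c]) c' hsplit'
      · -- c' starts a new chunk; first show fc' = e + 1
        have hgap : fc' = e + 1 := by
          have he1n : e + 1 < (xs.length : Int) := by omega
          have he0 : 0 ≤ e := MV_nonneg xs fc
          obtain ⟨k, hki⟩ : ∃ k : ℕ, (k : Int) = e + 1 := ⟨(e + 1).toNat, by omega⟩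
          have hkn : k < xs.length := by omega
          have hcovf : fIdx xs xs[k] ≤ e + 1 := by rw [← hki]; exact cover_f hkn
          have hcovl : e + 1 ≤ lIdx xs xs[k] := by rw [← hki]; exact cover_l hkn
          have hdx : xs[k] ∈ xs := List.getElem_mem hkn
          have hdfc : fIdx xs xs[k] = e + 1 := by
            by_contra hne'
            have hlt : fIdx xs xs[k] ≤ e := by omega
            have hdP : fIdx xs xs[k] ≤ fc := by
              rcases h3 xs[k] hdx with hP | heq | hS
              · exact le_of_lt (h1 _ hP)
              · rw [heq]
              · rcases List.mem_cons.1 hS with heq' | hS'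
                · rw [heq'] at hlt; omega
                · have := h2' xs[k] hS'
                  have := hbnd xs[k] hS
                  omega
            have := le_MV hdx hdP
            omega
          rcases h3 xs[k] hdx with hP | heq | hS
          · have := h1 _ hP; omega
          · rw [heq] at hdfc; omega
          · rcases List.mem_cons.1 hS with heq' | hS'
            · rw [heq'] at hdfc; omega
            · have := h2' xs[k] hS'; omega
        have hcuts' : cutsB xs fc' = cutsB xs fc ++ [e] := by
          refine cutsB_extend xs hfc0 (le_of_lt hfcc') rfl hfce (by omega) ?_
          intro i hi1 hi2
          rw [hplat i hi1 hi2]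
        have hstep : mergeStep
            (chunksOf (-1) (cutsB xs fc) ++ [((cutsB xs fc).getLastD (-1) + 1, e)])
            (fc', lc')
            = chunksOf (-1) (cutsB xs fc')
              ++ [((cutsB xs fc').getLastD (-1) + 1, MV xs fc')] := by
          unfold mergeStep
          rw [if_neg hne, pyGet_neg_one_concat]
          rw [if_neg (fun h => absurd h.1 hcase)]
          rw [hcuts', chunksOf_append, List.getLastD_concat, hMVfc',
              max_eq_right (by omega : e ≤ lc'), List.append_assoc, List.singleton_append,
              hgap]
          simp
        rw [hstep]
        exact ih (P ++ [c]) c' hsplit'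

-- ---- the B-side invariant ----
lemma B_inv (xs : List String) (k : ℕ) (hk : k ≤ xs.length) :
    ((PySem.List.enumerate xs 0).take k).foldl (stepB xs) ([], 0, 0)
    = (diffsF (-1) (cutsB xs (k : Int)),
       (cutsB xs (k : Int)).getLastD (-1) + 1,
       MV xs ((k : Int) - 1)) := by
  induction k with
  | zero =>
      rw [List.take_zero, List.foldl_nil, cutsB_nonpos xs (by omega), MV_neg xs (by omega)]
      rfl
  | succ k ih =>
      have hkl : k < xs.length := by omega
      have htake : (PySem.List.enumerate xs 0).take (k + 1)
          = (PySem.List.enumerate xs 0).take k ++ [((k : Int), xs[k])] := by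
        rw [List.take_add_one]
        congr 1
        have := PySem.List.getElem?_enumerate xs 0 k
        rw [List.getElem?_eq_getElem hkl] at this
        simp only [this]
        simp
      rw [htake, List.foldl_append, ih (by omega), List.foldl_cons, List.foldl_nil]
      unfold stepB
      rw [last_getD xs (List.getElem_mem hkl)]
      dsimp only
      rw [← MV_step xs k hkl]
      push_cast
      have harg : (k : Int) + 1 - 1 = (k : Int) := by ring
      rw [harg, cutsB_succ xs (Int.natCast_nonneg k)]
      by_cases hcut : (k : Int) = MV xs (k : Int)
      · rw [if_pos hcut, if_pos hcut.symm, diffsF_append, List.getLastD_concat]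
        have h1 : (k : Int) - ((cutsB xs (k : Int)).getLastD (-1) + 1) + 1
            = (k : Int) - (cutsB xs (k : Int)).getLastD (-1) := by ring
        rw [h1]
      · rw [if_neg hcut, if_neg (fun h => hcut h.symm), List.append_nil]

-- ===== VERDICT (by name: the statement is the Claim_ definition above) =====
theorem lengthEachScene_spec : Claim_equal_lengthEachScene := by
  intro xs _
  unfold Spec_lengthEachScene
  rcases List.eq_nil_or_concat' xs with rfl | hne'
  · decide
  · have hxne : xs ≠ [] := by
      rcases hne' with ⟨l, b, rfl⟩
      simp
    have h0 : 0 < xs.length := List.length_pos_iff.2 hxne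
    -- decompose the distinct-character list
    rcases hset : (PySem.Set.ofList xs : List String) with _ | ⟨c₀, S⟩
    · exfalso
      have : xs[0] ∈ (PySem.Set.ofList xs : List String) :=
        (mem_set_iff xs xs[0]).2 (List.getElem_mem h0)
      rw [hset] at this
      simp at this
    · obtain ⟨h1, h2, h3, hc₀⟩ := split_facts xs [] S c₀ (by simpa using hset)
      have hx0 : xs[0] = c₀ := by
        rcases h3 xs[0] (List.getElem_mem h0) with hP | rfl | hS
        · simp at hP
        · rfl
        · exfalso
          have hlt := h2 xs[0] hS
          have hge := cover_f (xs := xs) (k := 0) h0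
          have := fIdx_nonneg xs c₀
          simp at hge
          omega
      have hfc₀ : fIdx xs c₀ = 0 := by
        have hge := cover_f (xs := xs) (k := 0) h0
        rw [hx0] at hge
        have := fIdx_nonneg xs c₀
        simp at hge
        omega
      have hl0 : 0 ≤ lIdx xs c₀ := le_trans (by rw [hfc₀]) (fIdx_le_lIdx hc₀)
      have hMV0 : MV xs 0 = lIdx xs c₀ := by
        have := MV_at_first xs hc₀
        rw [hfc₀] at this
        rw [this, MV_neg xs (by omega)]
        omega
      -- A side
      rw [A_eq, hset, List.foldl_cons]
      have hinit : mergeStep [] (fIdx xs c₀, lIdx xs c₀)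
          = chunksOf (-1) (cutsB xs (fIdx xs c₀))
            ++ [((cutsB xs (fIdx xs c₀)).getLastD (-1) + 1, MV xs (fIdx xs c₀))] := by
        unfold mergeStep
        rw [if_pos (by simp), hfc₀, cutsB_nonpos xs (le_refl 0), hMV0]
        rfl
      rw [hinit, A_inv xs S [] c₀ (by simpa using hset)]
      -- B side
      have hB : lengthEachScene_alt xs = diffsF (-1) (cutsB xs (xs.length : Int)) := by
        rw [B_eq]
        have : (PySem.List.enumerate xs 0).take xs.length = PySem.List.enumerate xs 0 := by
          rw [← PySem.List.length_enumerate xs 0]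
          exact List.take_length
        rw [← this, B_inv xs xs.length (le_refl _)]
      rw [hB]
      -- bridge
      refine map_len_chunksOf (-1) (cutsB xs (xs.length : Int)) ?_
      rw [List.pairwise_cons]
      refine ⟨?_, cutsB_pairwise xs _⟩
      intro i hi
      have := cutsB_mem hi
      omega
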